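-- pv_equiv track=rewrite | github.com/sangbolee/gprism | gprism/utils/math.py | build_genotype_indices
-- ===== SOURCE A (Python) =====
-- def build_genotype_indices(combos, K):
--     """Pre-compute per-contributor genotype index lists.
--
--     Returns
--     -------
--     ref_indices, hetero_indices, homo_indices : list[list[int]]
--         Each is length K; element k is the list of combo indices where
--         contributor k has that genotype state.
--     """
--     ref_indices = [[] for _ in range(K)]
--     hetero_indices = [[] for _ in range(K)]
--     homo_indices = [[] for _ in range(K)]
--
--     for comp_idx, combo in enumerate(combos):
--         for k, gt in enumerate(combo):
--             if gt == "ref":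
--                 ref_indices[k].append(comp_idx)
--             elif gt == "hetero":
--                 hetero_indices[k].append(comp_idx)
--             elif gt == "homo":
--                 homo_indices[k].append(comp_idx)
--
--     return ref_indices, hetero_indices, homo_indices
-- ===== SOURCE B (Python) =====
-- def _bucket(combos, K, state):
--     """Index lists for one genotype state: a full pass over combos for this state only."""
--     out = [[] for _ in range(K)]
--     for i, combo in enumerate(combos):
--         for k, gt in enumerate(combo):
--             if gt == state:
--                 out[k].append(i)
--     return out
--
--
-- def build_genotype_indices(combos, K):
--     """Per-contributor genotype index lists, one independent pass per genotype state."""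
--     combos = list(combos)
--     return _bucket(combos, K, "ref"), _bucket(combos, K, "hetero"), _bucket(combos, K, "homo")
-- ===== Notes on version B (the rewrite author's own statement) =====
-- stated objective: alternative
-- what changed: Replaces A's single bucketing pass that dispatches into three pre-allocated list-of-lists via if/elif with three independent passes, each collecting the index lists for exactly one genotype state.
import Mathlib
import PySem

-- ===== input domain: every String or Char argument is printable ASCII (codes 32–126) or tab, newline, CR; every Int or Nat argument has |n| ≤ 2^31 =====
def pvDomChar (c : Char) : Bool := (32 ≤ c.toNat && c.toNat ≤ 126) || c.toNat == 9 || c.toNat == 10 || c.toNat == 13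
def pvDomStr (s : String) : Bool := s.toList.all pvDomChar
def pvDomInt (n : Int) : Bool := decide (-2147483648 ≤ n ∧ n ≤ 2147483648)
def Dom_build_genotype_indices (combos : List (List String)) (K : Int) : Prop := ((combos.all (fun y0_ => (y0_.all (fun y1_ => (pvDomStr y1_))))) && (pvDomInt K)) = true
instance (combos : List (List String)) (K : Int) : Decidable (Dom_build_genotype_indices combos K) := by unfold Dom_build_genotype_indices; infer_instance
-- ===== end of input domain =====

-- B replaces A's single three-way bucketing pass with three independent per-state passes;
-- return-value equivalence on Pre_, neither program mutates its arguments.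

-- ===== PORT A =====
-- xss[k].append(v); Python raises IndexError when k is out of range — List.modify is a
-- no-op there; exactly those inputs are excluded by Pre_build_genotype_indices.
def pvAppendAt (xss : List (List Int)) (k : Nat) (v : Int) : List (List Int) :=
  xss.modify k (fun l => l ++ [v])

def build_genotype_indices (combos : List (List String)) (K : Int) : List (List Int) × List (List Int) × List (List Int) :=
  let empty : List (List Int) := (PySem.List.pyRange 0 K 1).map (fun _ => ([] : List Int))
  (PySem.List.enumerate combos).foldl
    (fun st p =>
      (PySem.List.enumerate p.2).foldl
        (fun st2 q =>
          if q.2 == "ref" then (pvAppendAt st2.1 q.1.toNat p.1, st2.2.1, st2.2.2)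
          else if q.2 == "hetero" then (st2.1, pvAppendAt st2.2.1 q.1.toNat p.1, st2.2.2)
          else if q.2 == "homo" then (st2.1, st2.2.1, pvAppendAt st2.2.2 q.1.toNat p.1)
          else st2)
        st)
    (empty, empty, empty)

-- ===== PORT B =====
-- _bucket(combos, K, state): one pass over combos collecting index lists for a single state
def pvBucket (combos : List (List String)) (K : Int) (state : String) : List (List Int) :=
  (PySem.List.enumerate combos).foldl
    (fun out p =>
      (PySem.List.enumerate p.2).foldl
        (fun out2 q => if q.2 == state then pvAppendAt out2 q.1.toNat p.1 else out2)
        out)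
    ((PySem.List.pyRange 0 K 1).map (fun _ => ([] : List Int)))

def build_genotype_indices_alt (combos : List (List String)) (K : Int) : List (List Int) × List (List Int) × List (List Int) :=
  (pvBucket combos K "ref", pvBucket combos K "hetero", pvBucket combos K "homo")

-- ===== PRECONDITION & SPEC =====
-- Pre_ excludes exactly the inputs on which Python A raises IndexError: a combo entry at a
-- position ≥ K (≥ 0 when K < 0) that equals one of the three genotype states.
def Pre_build_genotype_indices (combos : List (List String)) (K : Int) : Prop :=
  ∀ cb ∈ combos, ∀ g ∈ cb.drop K.toNat, g ≠ "ref" ∧ g ≠ "hetero" ∧ g ≠ "homo"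
instance (combos : List (List String)) (K : Int) : Decidable (Pre_build_genotype_indices combos K) := by unfold Pre_build_genotype_indices; infer_instance

def pvWitness_build_genotype_indices : List (List String) × Int :=
  ([["ref", "homo"], ["hetero", "ref"]], 2)

def Spec_build_genotype_indices (combos : List (List String)) (K : Int) (out : List (List Int) × List (List Int) × List (List Int)) : Prop := out = build_genotype_indices_alt combos K
instance (combos : List (List String)) (K : Int) (out : List (List Int) × List (List Int) × List (List Int)) : Decidable (Spec_build_genotype_indices combos K out) := by unfold Spec_build_genotype_indices; infer_instance

-- ===== CLAIM (what is proved, stated in full; the proofs are below) =====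
def Claim_equal_build_genotype_indices : Prop := ∀ (combos : List (List String)) (K : Int), Dom_build_genotype_indices combos K → Pre_build_genotype_indices combos K → Spec_build_genotype_indices combos K (build_genotype_indices combos K)

-- ===== LEMMAS AND PROOFS =====

-- named forms of A's two loop bodies (proof-side only; `rfl`-equal to the port's lambdas)
def pvStepInner (i : Int) (st2 : List (List Int) × List (List Int) × List (List Int)) (q : Int × String) : List (List Int) × List (List Int) × List (List Int) :=
  if q.2 == "ref" then (pvAppendAt st2.1 q.1.toNat i, st2.2.1, st2.2.2)
  else if q.2 == "hetero" then (st2.1, pvAppendAt st2.2.1 q.1.toNat i, st2.2.2)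
  else if q.2 == "homo" then (st2.1, st2.2.1, pvAppendAt st2.2.2 q.1.toNat i)
  else st2

def pvStep (st : List (List Int) × List (List Int) × List (List Int)) (p : Int × List String) : List (List Int) × List (List Int) × List (List Int) :=
  (PySem.List.enumerate p.2).foldl (pvStepInner p.1) st

theorem pvA_eq (combos : List (List String)) (K : Int) :
    build_genotype_indices combos K =
      (PySem.List.enumerate combos).foldl pvStep
        ((PySem.List.pyRange 0 K 1).map (fun _ => ([] : List Int)),
         (PySem.List.pyRange 0 K 1).map (fun _ => ([] : List Int)),
         (PySem.List.pyRange 0 K 1).map (fun _ => ([] : List Int))) := rfl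

-- the list of (Int) combo indices, counted from n, whose entry at position k equals s
def pvCol (n : Int) (combos : List (List String)) (k : Nat) (s : String) : List Int :=
  match combos with
  | [] => []
  | cb :: rest => (if cb[k]? = some s then [n] else []) ++ pvCol (n + 1) rest k s

-- the effect of one combo's inner loop on ONE index-list family
def pvUpd (X : List (List Int)) (cb : List String) (j : Nat) (s : String) (i : Int) : List (List Int) :=
  match cb with
  | [] => X
  | g :: rest => pvUpd (if g = s then pvAppendAt X j i else X) rest (j + 1) s i

theorem pvUpd_getElem? (cb : List String) (j : Nat) (X : List (List Int)) (s : String) (i : Int) (k : Nat) :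
    (pvUpd X cb j s i)[k]? =
      if j ≤ k ∧ cb[k - j]? = some s then X[k]?.map (· ++ [i]) else X[k]? := by
  induction cb generalizing j X with
  | nil => simp [pvUpd]
  | cons g rest ih =>
    rw [show pvUpd X (g :: rest) j s i = pvUpd (if g = s then pvAppendAt X j i else X) rest (j + 1) s i from rfl, ih]
    by_cases hk : k = j
    · subst hk
      simp only [Nat.sub_self, List.getElem?_cons_zero, Nat.le_refl, true_and]
      have h1 : ¬ (k + 1 ≤ k) := by omega
      simp only [h1, false_and, if_false]
      by_cases hg : g = s
      · simp only [hg, pvAppendAt]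
        cases h2 : X[k]? <;> simp [h2]
      · simp [hg]
    · have hX : (if g = s then pvAppendAt X j i else X)[k]? = X[k]? := by
        split <;> simp [pvAppendAt, Ne.symm hk]
      rw [hX]
      rcases Nat.lt_or_ge k j with h | h
      · have h1 : ¬ (j + 1 ≤ k) := by omega
        have h2 : ¬ (j ≤ k) := by omega
        simp [h1, h2]
      · have hj : j ≤ k := h
        have hidx : (g :: rest)[k - j]? = rest[k - (j + 1)]? := by
          have : k - j = (k - (j + 1)) + 1 := by omega
          rw [this]; simp
        have hj1 : j + 1 ≤ k := by omega
        simp [hj, hj1, hidx]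

-- A's inner fold splits into three independent pvUpd's
theorem pvInner_eq (cb : List String) (j : Int) (hj : 0 ≤ j) (R H M : List (List Int)) (i : Int) :
    (PySem.List.enumerate cb j).foldl (pvStepInner i) (R, H, M)
      = (pvUpd R cb j.toNat "ref" i, pvUpd H cb j.toNat "hetero" i, pvUpd M cb j.toNat "homo" i) := by
  induction cb generalizing j R H M with
  | nil => simp [PySem.List.enumerate_nil, pvUpd]
  | cons g rest ih =>
    rw [PySem.List.enumerate_cons, List.foldl_cons]
    have hj1 : (0:Int) ≤ j + 1 := by omega
    have htn : (j + 1).toNat = j.toNat + 1 := by omega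
    by_cases h1 : g = "ref"
    · rw [show pvStepInner i (R, H, M) (j, g) = (pvAppendAt R j.toNat i, H, M) by
        simp [pvStepInner, h1]]
      rw [ih (j + 1) hj1]
      simp [pvUpd, htn, h1]
    · by_cases h2 : g = "hetero"
      · rw [show pvStepInner i (R, H, M) (j, g) = (R, pvAppendAt H j.toNat i, M) by
          simp [pvStepInner, h2]]
        rw [ih (j + 1) hj1]
        simp [pvUpd, htn, h2]
      · by_cases h3 : g = "homo"
        · rw [show pvStepInner i (R, H, M) (j, g) = (R, H, pvAppendAt M j.toNat i) by
            simp [pvStepInner, h3]]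
          rw [ih (j + 1) hj1]
          simp [pvUpd, htn, h3]
        · rw [show pvStepInner i (R, H, M) (j, g) = (R, H, M) by
            simp [pvStepInner, h1, h2, h3]]
          rw [ih (j + 1) hj1]
          simp [pvUpd, htn, h1, h2, h3]

-- A's outer fold, per component and per index
theorem pvOuter_getElem? (combos : List (List String)) (n : Int) (R H M : List (List Int)) (k : Nat) :
    ((PySem.List.enumerate combos n).foldl pvStep (R, H, M)).1[k]? = R[k]?.map (· ++ pvCol n combos k "ref") ∧
    ((PySem.List.enumerate combos n).foldl pvStep (R, H, M)).2.1[k]? = H[k]?.map (· ++ pvCol n combos k "hetero") ∧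
    ((PySem.List.enumerate combos n).foldl pvStep (R, H, M)).2.2[k]? = M[k]?.map (· ++ pvCol n combos k "homo") := by
  induction combos generalizing n R H M with
  | nil =>
    simp only [PySem.List.enumerate_nil, List.foldl_nil, pvCol]
    refine ⟨?_, ?_, ?_⟩ <;> [cases R[k]?; cases H[k]?; cases M[k]?] <;> simp
  | cons cb rest ih =>
    rw [PySem.List.enumerate_cons, List.foldl_cons]
    rw [show pvStep (R, H, M) (n, cb) = (pvUpd R cb 0 "ref" n, pvUpd H cb 0 "hetero" n, pvUpd M cb 0 "homo" n) by
      rw [show pvStep (R, H, M) (n, cb) = (PySem.List.enumerate cb 0).foldl (pvStepInner n) (R, H, M) from rfl,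
        pvInner_eq cb 0 (by omega)]
      rfl]
    obtain ⟨ih1, ih2, ih3⟩ := ih (n + 1) (pvUpd R cb 0 "ref" n) (pvUpd H cb 0 "hetero" n) (pvUpd M cb 0 "homo" n)
    refine ⟨?_, ?_, ?_⟩
    · rw [ih1, pvUpd_getElem? cb 0 R "ref" n k]
      simp only [Nat.sub_zero, Nat.zero_le, true_and, pvCol]
      by_cases hc : cb[k]? = some "ref" <;> cases R[k]? <;> simp [hc]
    · rw [ih2, pvUpd_getElem? cb 0 H "hetero" n k]
      simp only [Nat.sub_zero, Nat.zero_le, true_and, pvCol]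
      by_cases hc : cb[k]? = some "hetero" <;> cases H[k]? <;> simp [hc]
    · rw [ih3, pvUpd_getElem? cb 0 M "homo" n k]
      simp only [Nat.sub_zero, Nat.zero_le, true_and, pvCol]
      by_cases hc : cb[k]? = some "homo" <;> cases M[k]? <;> simp [hc]

-- B's inner loop (one state) equals pvUpd
theorem pvInnerB_eq (cb : List String) (j : Int) (hj : 0 ≤ j) (X : List (List Int)) (s : String) (i : Int) :
    (PySem.List.enumerate cb j).foldl
        (fun out2 q => if q.2 == s then pvAppendAt out2 q.1.toNat i else out2) X
      = pvUpd X cb j.toNat s i := by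
  induction cb generalizing j X with
  | nil => simp [PySem.List.enumerate_nil, pvUpd]
  | cons g rest ih =>
    rw [PySem.List.enumerate_cons, List.foldl_cons]
    have hj1 : (0:Int) ≤ j + 1 := by omega
    have htn : (j + 1).toNat = j.toNat + 1 := by omega
    by_cases hg : g = s
    · rw [show (if (j, g).2 == s then pvAppendAt X (j, g).1.toNat i else X) = pvAppendAt X j.toNat i by simp [hg]]
      rw [ih (j + 1) hj1]
      simp [pvUpd, htn, hg]
    · rw [show (if (j, g).2 == s then pvAppendAt X (j, g).1.toNat i else X) = X by simp [hg]]
      rw [ih (j + 1) hj1]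
      simp [pvUpd, htn, hg]

-- B's whole pass for one state, per index
theorem pvBucketFold_getElem? (combos : List (List String)) (n : Int) (X : List (List Int)) (s : String) (k : Nat) :
    ((PySem.List.enumerate combos n).foldl
        (fun out p =>
          (PySem.List.enumerate p.2).foldl
            (fun out2 q => if q.2 == s then pvAppendAt out2 q.1.toNat p.1 else out2) out) X)[k]?
      = X[k]?.map (· ++ pvCol n combos k s) := by
  induction combos generalizing n X with
  | nil =>
    simp only [PySem.List.enumerate_nil, List.foldl_nil, pvCol]
    cases X[k]? <;> simp
  | cons cb rest ih =>
    rw [PySem.List.enumerate_cons, List.foldl_cons]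
    rw [show (PySem.List.enumerate cb).foldl
          (fun out2 q => if q.2 == s then pvAppendAt out2 q.1.toNat (n, cb).1 else out2) X
        = pvUpd X cb 0 s n by
      rw [pvInnerB_eq cb 0 (by omega)]; rfl]
    rw [ih (n + 1)]
    rw [pvUpd_getElem? cb 0 X s n k]
    simp only [Nat.sub_zero, Nat.zero_le, true_and, pvCol]
    by_cases hc : cb[k]? = some s <;> cases X[k]? <;> simp [hc]

theorem pvBucket_getElem? (combos : List (List String)) (K : Int) (s : String) (k : Nat) :
    (pvBucket combos K s)[k]? =
      ((PySem.List.pyRange 0 K 1).map (fun _ => ([] : List Int)))[k]?.map (· ++ pvCol 0 combos k s) := by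
  unfold pvBucket
  exact pvBucketFold_getElem? combos 0 _ s k

-- ===== VERDICT (by name: the statement is the Claim_ definition above) =====
theorem build_genotype_indices_spec : Claim_equal_build_genotype_indices := by
  intro combos K _ _
  unfold Spec_build_genotype_indices build_genotype_indices_alt
  rw [pvA_eq]
  refine Prod.ext ?_ (Prod.ext ?_ ?_)
  · apply List.ext_getElem?
    intro k
    rw [(pvOuter_getElem? combos 0 _ _ _ k).1, pvBucket_getElem?]
  · apply List.ext_getElem?
    intro k
    rw [(pvOuter_getElem? combos 0 _ _ _ k).2.1, pvBucket_getElem?]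
  · apply List.ext_getElem?
    intro k
    rw [(pvOuter_getElem? combos 0 _ _ _ k).2.2, pvBucket_getElem?]
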